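-- pv_equiv track=rewrite | github.com/Andrey-Bedretdinov/School | Other/МЦКО 11кл.py | f
-- ===== SOURCE A (Python) =====
-- def f(x):
--     l = 0
--     m = 0
--     while x > 0:
--         m += 2
--         if x % 8 != 0:
--             l += 1
--         x //= 8
--     return l, m
-- ===== SOURCE B (Python) =====
-- def f(x):
--     if x <= 0:
--         return (0, 0)
--     s = oct(x)[2:]
--     return (len(s) - s.count('0'), 2 * len(s))
-- ===== Notes on version B (the rewrite author's own statement) =====
-- stated objective: idiomatic
-- what changed: Replaces the arithmetic division loop with a library octal conversion and a string pass: the first result is the number of nonzero octal digits, the second is twice the total digit count.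
import Mathlib
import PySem

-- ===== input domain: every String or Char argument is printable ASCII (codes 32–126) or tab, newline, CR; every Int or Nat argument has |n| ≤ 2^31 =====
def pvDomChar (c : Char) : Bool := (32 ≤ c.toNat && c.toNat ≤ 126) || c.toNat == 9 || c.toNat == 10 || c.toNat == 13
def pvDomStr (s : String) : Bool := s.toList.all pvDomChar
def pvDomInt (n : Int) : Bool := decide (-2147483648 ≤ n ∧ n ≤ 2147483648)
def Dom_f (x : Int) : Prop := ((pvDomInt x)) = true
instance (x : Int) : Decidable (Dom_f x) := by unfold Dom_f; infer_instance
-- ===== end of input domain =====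

-- B changes the strategy: library octal conversion + a digit count instead of A's division loop.
-- ===== PORT A =====
-- the while loop of A, state (x, l, m)
def fLoop (x l m : Int) : Int × Int :=
  if h : x > 0 then
    fLoop (PySem.Int.floordiv x 8) (if PySem.Int.mod x 8 ≠ 0 then l + 1 else l) (m + 2)
  else (l, m)
termination_by x.toNat
decreasing_by
  have h8 : (0:Int) < 8 := by norm_num
  rw [PySem.Int.floordiv_eq_ediv_of_pos h8]
  omega

def f (x : Int) : Int × Int := fLoop x 0 0

-- ===== PORT B =====
-- oct(x)[2:] gives x's octal digits; Nat.digits 8 is the corresponding Lean conversion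
def f_alt (x : Int) : Int × Int :=
  if x ≤ 0 then (0, 0)
  else
    let s := Nat.digits 8 x.toNat
    (((s.length - s.count 0 : Nat) : Int), 2 * (s.length : Int))

-- ===== PRECONDITION & SPEC =====
def Spec_f (x : Int) (out : Int × Int) : Prop := out = f_alt x
instance (x : Int) (out : Int × Int) : Decidable (Spec_f x out) := by unfold Spec_f; infer_instance

-- ===== CLAIM (what is proved, stated in full; the proofs are below) =====
def Claim_equal_f : Prop := ∀ (x : Int), Dom_f x → Spec_f x (f x)

-- ===== LEMMAS AND PROOFS =====

lemma fLoop_eq_nat (n : Nat) (l m : Int) :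
    fLoop (n : Int) l m =
      (l + (((Nat.digits 8 n).length - (Nat.digits 8 n).count 0 : Nat) : Int),
       m + 2 * ((Nat.digits 8 n).length : Int)) := by
  induction n using Nat.strong_induction_on generalizing l m with
  | _ n ih =>
    rw [fLoop]
    by_cases hn : 0 < n
    · have hpos : (n : Int) > 0 := by exact_mod_cast hn
      rw [dif_pos hpos]
      have hdiv : PySem.Int.floordiv (n : Int) 8 = ((n / 8 : Nat) : Int) := by
        exact_mod_cast PySem.Int.floordiv_natCast n 8
      have hmod : PySem.Int.mod (n : Int) 8 = ((n % 8 : Nat) : Int) := by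
        exact_mod_cast PySem.Int.mod_natCast n 8
      rw [hdiv, hmod, ih (n / 8) (Nat.div_lt_self hn (by norm_num))]
      have hdigits : Nat.digits 8 n = n % 8 :: Nat.digits 8 (n / 8) :=
        Nat.digits_def' (by norm_num) hn
      rw [hdigits]
      refine Prod.ext ?_ ?_
      · by_cases hz : n % 8 = 0
        · rw [if_neg (by exact_mod_cast (by simp [hz] : ¬ ((n % 8 : Nat) : Int) ≠ 0))]
          have hc : List.count 0 (n % 8 :: Nat.digits 8 (n / 8))
              = List.count 0 (Nat.digits 8 (n / 8)) + 1 := by simp [hz]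
          rw [hc]
          have h1 : (Nat.digits 8 (n / 8)).length + 1 - (List.count 0 (Nat.digits 8 (n / 8)) + 1)
              = (Nat.digits 8 (n / 8)).length - List.count 0 (Nat.digits 8 (n / 8)) := by omega
          rw [List.length_cons, h1]
        · rw [if_pos (by exact_mod_cast hz : ((n % 8 : Nat) : Int) ≠ 0)]
          rw [List.length_cons, List.count_cons_of_ne hz]
          have hcle : List.count 0 (Nat.digits 8 (n / 8)) ≤ (Nat.digits 8 (n / 8)).length :=
            List.count_le_length
          have h1 : (Nat.digits 8 (n / 8)).length + 1 - List.count 0 (Nat.digits 8 (n / 8))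
              = ((Nat.digits 8 (n / 8)).length - List.count 0 (Nat.digits 8 (n / 8))) + 1 := by omega
          rw [h1]
          push_cast
          ring
      · rw [List.length_cons]
        push_cast
        ring
    · have : ¬ ((n : Int) > 0) := by exact_mod_cast hn
      rw [dif_neg this]
      have : n = 0 := by omega
      subst this
      simp

-- ===== VERDICT (by name: the statement is the Claim_ definition above) =====
theorem f_spec : Claim_equal_f := by
  intro x _
  unfold Spec_f f f_alt
  by_cases hx : x ≤ 0
  · rw [fLoop]
    have : ¬ (x > 0) := by omega
    rw [dif_neg this, if_pos hx]
  · obtain ⟨n, rfl⟩ : ∃ n : Nat, x = (n : Int) := ⟨x.toNat, by omega⟩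
    rw [if_neg hx, fLoop_eq_nat]
    simp
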